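-- pv_equiv track=rewrite | github.com/ram677/leetcode_pod | Daily_Challenge/number_of_ways_to_paint_n_x_3_grid.py | numOfWays
-- ===== SOURCE A (Python) =====
-- def numOfWays(n: int) -> int:
--     MOD = 10**9 + 7
--
--     # Initial state for n = 1
--     # 'abc' is the number of ways to paint a row with 3 distinct colors
--     # 'aba' is the number of ways to paint a row with 2 distinct colors
--     abc = 6
--     aba = 6
--
--     for _ in range(n - 1):
--         # Calculate next counts based on transition rules
--         new_abc = (2 * abc + 2 * aba) % MOD
--         new_aba = (2 * abc + 3 * aba) % MOD
--
--         abc = new_abc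
--         aba = new_aba
--
--     return (abc + aba) % MOD
-- ===== SOURCE B (Python) =====
-- def numOfWays(n: int) -> int:
--     # Matrix exponentiation of the 2x2 transition matrix: O(log n) instead of O(n).
--     MOD = 10**9 + 7
--
--     def mul(X, Y):
--         (a, b), (c, d) = X
--         (e, f), (g, h) = Y
--         return ((a * e + b * g) % MOD, (a * f + b * h) % MOD), \
--                ((c * e + d * g) % MOD, (c * f + d * h) % MOD)
--
--     def mpow(M, k):
--         R = ((1, 0), (0, 1))
--         while k:
--             if k & 1:
--                 R = mul(R, M)
--             M = mul(M, M)
--             k >>= 1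
--         return R
--
--     k = n - 1 if n > 1 else 0
--     P = mpow(((2, 2), (2, 3)), k)
--     abc = (6 * P[0][0] + 6 * P[1][0]) % MOD
--     aba = (6 * P[0][1] + 6 * P[1][1]) % MOD
--     return (abc + aba) % MOD
-- ===== Notes on version B (the rewrite author's own statement) =====
-- stated objective: faster
-- what changed: Replaces the O(n) loop over the linear recurrence with square-and-multiply exponentiation of the 2x2 transition matrix [[2,2],[2,3]] mod 10^9+7.
import Mathlib
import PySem

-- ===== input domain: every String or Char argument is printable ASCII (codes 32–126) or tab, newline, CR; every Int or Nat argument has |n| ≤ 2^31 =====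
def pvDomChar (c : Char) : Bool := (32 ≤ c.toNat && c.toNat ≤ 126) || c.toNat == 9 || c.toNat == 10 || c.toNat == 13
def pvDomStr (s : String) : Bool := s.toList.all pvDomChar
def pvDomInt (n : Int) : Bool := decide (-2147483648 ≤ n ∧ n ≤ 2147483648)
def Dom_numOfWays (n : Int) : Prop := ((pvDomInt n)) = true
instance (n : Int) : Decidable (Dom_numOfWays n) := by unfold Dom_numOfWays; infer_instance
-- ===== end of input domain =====

-- B replaces A's O(n) linear recurrence loop by binary exponentiation of the
-- 2x2 transition matrix mod 10^9+7 (an asymptotically faster alternative, O(log n)).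

def pvMOD : Int := 1000000007

-- ===== PORT A =====
-- one iteration of A's loop body on the state (abc, aba)
def pvStepA (s : Int × Int) : Int × Int :=
  (PySem.Int.mod (2 * s.1 + 2 * s.2) pvMOD, PySem.Int.mod (2 * s.1 + 3 * s.2) pvMOD)

-- 'for _ in range(n - 1)': the body ignores the index, so it repeats (n-1) times
def pvLoopA : Nat → Int × Int → Int × Int
  | 0, s => s
  | k + 1, s => pvLoopA k (pvStepA s)

def numOfWays (n : Int) : Int :=
  let s := pvLoopA (n - 1).toNat (6, 6)
  PySem.Int.mod (s.1 + s.2) pvMOD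

-- ===== PORT B =====
-- 2x2 matrix product mod 10^9+7 (Source B's mul)
def pvMul (X Y : (Int × Int) × (Int × Int)) : (Int × Int) × (Int × Int) :=
  ((PySem.Int.mod (X.1.1 * Y.1.1 + X.1.2 * Y.2.1) pvMOD,
    PySem.Int.mod (X.1.1 * Y.1.2 + X.1.2 * Y.2.2) pvMOD),
   (PySem.Int.mod (X.2.1 * Y.1.1 + X.2.2 * Y.2.1) pvMOD,
    PySem.Int.mod (X.2.1 * Y.1.2 + X.2.2 * Y.2.2) pvMOD))

-- Source B's mpow loop: R accumulator, square-and-multiply on the bits of k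
def pvMpow (R M : (Int × Int) × (Int × Int)) (k : Nat) : (Int × Int) × (Int × Int) :=
  if k = 0 then R
  else pvMpow (if k % 2 = 1 then pvMul R M else R) (pvMul M M) (k / 2)
termination_by k
decreasing_by exact Nat.div_lt_self (Nat.pos_of_ne_zero (by assumption)) (by norm_num)

def numOfWays_alt (n : Int) : Int :=
  let k : Nat := if n > 1 then (n - 1).toNat else 0
  let P := pvMpow ((1, 0), (0, 1)) ((2, 2), (2, 3)) k
  let abc := PySem.Int.mod (6 * P.1.1 + 6 * P.2.1) pvMOD
  let aba := PySem.Int.mod (6 * P.1.2 + 6 * P.2.2) pvMOD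
  PySem.Int.mod (abc + aba) pvMOD

-- ===== PRECONDITION & SPEC =====
def Spec_numOfWays (n : Int) (out : Int) : Prop := out = numOfWays_alt n
instance (n : Int) (out : Int) : Decidable (Spec_numOfWays n out) := by unfold Spec_numOfWays; infer_instance

-- ===== CLAIM (what is proved, stated in full; the proofs are below) =====
def Claim_equal_numOfWays : Prop := ∀ (n : Int), Dom_numOfWays n → Spec_numOfWays n (numOfWays n)

-- ===== LEMMAS AND PROOFS =====

abbrev pvZ := ZMod 1000000007

def pvPhiM (X : (Int × Int) × (Int × Int)) : Matrix (Fin 2) (Fin 2) pvZ :=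
  !![(X.1.1 : pvZ), (X.1.2 : pvZ); (X.2.1 : pvZ), (X.2.2 : pvZ)]

def pvPhiV (s : Int × Int) : Matrix (Fin 1) (Fin 2) pvZ := !![(s.1 : pvZ), (s.2 : pvZ)]

def pvT : (Int × Int) × (Int × Int) := ((2, 2), (2, 3))

theorem pv_cast_mod (a : Int) : ((PySem.Int.mod a pvMOD : Int) : pvZ) = (a : pvZ) := by
  rw [PySem.Int.mod_eq_emod_of_pos (show (0:Int) < pvMOD by norm_num [pvMOD])]
  have h : pvMOD = ((1000000007 : ℕ) : Int) := by norm_num [pvMOD]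
  rw [h]
  exact ZMod.intCast_mod a 1000000007

theorem pv_mod_congr (a b : Int) (h : (a : pvZ) = (b : pvZ)) :
    PySem.Int.mod a pvMOD = PySem.Int.mod b pvMOD := by
  rw [PySem.Int.mod_eq_emod_of_pos (show (0:Int) < pvMOD by norm_num [pvMOD]),
      PySem.Int.mod_eq_emod_of_pos (show (0:Int) < pvMOD by norm_num [pvMOD])]
  have h' : a ≡ b [ZMOD (1000000007 : ℕ)] := (ZMod.intCast_eq_intCast_iff a b 1000000007).mp h
  have := h'
  unfold Int.ModEq at this
  simpa [pvMOD] using this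

theorem pv_mulPhi (X Y : (Int × Int) × (Int × Int)) :
    pvPhiM (pvMul X Y) = pvPhiM X * pvPhiM Y := by
  simp only [pvMul, pvPhiM, Matrix.mul_fin_two, pv_cast_mod]
  push_cast
  rfl

theorem pv_mpowPhi : ∀ (k : Nat) (R M : (Int × Int) × (Int × Int)),
    pvPhiM (pvMpow R M k) = pvPhiM R * pvPhiM M ^ k := by
  intro k
  induction k using Nat.strong_induction_on with
  | _ k ih =>
    intro R M
    rw [pvMpow]
    by_cases h0 : k = 0
    · simp [h0]
    · simp only [h0, if_false]
      rw [ih (k / 2) (Nat.div_lt_self (Nat.pos_of_ne_zero h0) (by norm_num))]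
      rw [pv_mulPhi]
      have hk : k = 2 * (k / 2) + k % 2 := (Nat.div_add_mod k 2).symm.trans (by ring)
      have hsq : (pvPhiM M * pvPhiM M) ^ (k / 2) = pvPhiM M ^ (2 * (k / 2)) := by
        rw [pow_mul, sq]
      by_cases hp : k % 2 = 1
      · have he : 2 * (k / 2) + 1 = k := by omega
        simp only [hp, if_true, pv_mulPhi]
        rw [hsq, mul_assoc, ← pow_succ' (pvPhiM M) (2 * (k / 2)), he]
      · have he : 2 * (k / 2) = k := by omega
        simp only [hp, if_false]
        rw [hsq, he]

theorem pv_stepPhi (s : Int × Int) :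
    pvPhiV (pvStepA s) = pvPhiV s * pvPhiM pvT := by
  ext i j
  fin_cases i ; fin_cases j <;>
    simp [pvStepA, pvPhiV, pvPhiM, pvT, Matrix.mul_apply, Fin.sum_univ_two, pv_cast_mod, mul_comm]

theorem pv_loopPhi : ∀ (k : Nat) (s : Int × Int),
    pvPhiV (pvLoopA k s) = pvPhiV s * pvPhiM pvT ^ k := by
  intro k
  induction k with
  | zero => intro s; simp [pvLoopA]
  | succ k ih =>
    intro s
    rw [pvLoopA, ih, pv_stepPhi, Matrix.mul_assoc, ← pow_succ' (pvPhiM pvT) k]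

theorem pv_onePhi : pvPhiM ((1, 0), (0, 1)) = 1 := by
  rw [Matrix.one_fin_two]; simp [pvPhiM]

-- ===== VERDICT (by name: the statement is the Claim_ definition above) =====
theorem numOfWays_spec : Claim_equal_numOfWays := by
  intro n _
  unfold Spec_numOfWays numOfWays numOfWays_alt
  have hk : (if n > 1 then (n - 1).toNat else 0) = (n - 1).toNat := by
    split <;> omega
  rw [hk]
  set k := (n - 1).toNat with hkdef
  set s := pvLoopA k (6, 6) with hs
  set P := pvMpow ((1, 0), (0, 1)) ((2, 2), (2, 3)) k with hP
  apply pv_mod_congr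
  have hPv : pvPhiM P = pvPhiM pvT ^ k := by
    rw [hP]
    have := pv_mpowPhi k ((1, 0), (0, 1)) ((2, 2), (2, 3))
    rw [pv_onePhi, one_mul] at this
    exact this
  have hSv : pvPhiV s = pvPhiV (6, 6) * pvPhiM pvT ^ k := pv_loopPhi k (6, 6)
  -- read off the entries
  have h00 : ((s.1 : pvZ)) = 6 * (pvPhiM pvT ^ k) 0 0 + 6 * (pvPhiM pvT ^ k) 1 0 := by
    have := congrArg (fun m => m 0 0) hSv
    simpa [pvPhiV, Matrix.mul_apply, Fin.sum_univ_two] using this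
  have h01 : ((s.2 : pvZ)) = 6 * (pvPhiM pvT ^ k) 0 1 + 6 * (pvPhiM pvT ^ k) 1 1 := by
    have := congrArg (fun m => m 0 1) hSv
    simpa [pvPhiV, Matrix.mul_apply, Fin.sum_univ_two] using this
  have e00 : ((P.1.1 : pvZ)) = (pvPhiM pvT ^ k) 0 0 := by
    have := congrArg (fun m => m 0 0) hPv; simpa [pvPhiM] using this
  have e01 : ((P.1.2 : pvZ)) = (pvPhiM pvT ^ k) 0 1 := by
    have := congrArg (fun m => m 0 1) hPv; simpa [pvPhiM] using this
  have e10 : ((P.2.1 : pvZ)) = (pvPhiM pvT ^ k) 1 0 := by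
    have := congrArg (fun m => m 1 0) hPv; simpa [pvPhiM] using this
  have e11 : ((P.2.2 : pvZ)) = (pvPhiM pvT ^ k) 1 1 := by
    have := congrArg (fun m => m 1 1) hPv; simpa [pvPhiM] using this
  push_cast [pv_cast_mod]
  rw [h00, h01, e00, e01, e10, e11]
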